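-- pv_equiv track=rewrite | github.com/lizhenfen/works | elasticsearchs/web/views.py | listtogroup
-- ===== SOURCE A (Python) =====
-- def listtogroup(lreq):
--     res = []
--     for i in enumerate(lreq):
--         try:
--             test = "[" + str(i[1]) + "," + str(lreq[i[0] + 1]) + ")"
--         except:
--             test = "[" + str(i[1]) + "," + ")"
--         res.append(test)
--     return res
-- ===== SOURCE B (Python) =====
-- def listtogroup(lreq):
--     res = []
--     nxt = None
--     for x in reversed(lreq):
--         if nxt is None:
--             res.append("[" + str(x) + ",)")
--         else:
--             res.append("[" + str(x) + "," + str(nxt) + ")")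
--         nxt = x
--     res.reverse()
--     return res
-- ===== Notes on version B (the rewrite author's own statement) =====
-- stated objective: alternative
-- what changed: Traverses the list right-to-left carrying the successor element in a variable (so no index lookup and no exception-based boundary detection), building the result backwards and reversing it at the end.
import Mathlib
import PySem

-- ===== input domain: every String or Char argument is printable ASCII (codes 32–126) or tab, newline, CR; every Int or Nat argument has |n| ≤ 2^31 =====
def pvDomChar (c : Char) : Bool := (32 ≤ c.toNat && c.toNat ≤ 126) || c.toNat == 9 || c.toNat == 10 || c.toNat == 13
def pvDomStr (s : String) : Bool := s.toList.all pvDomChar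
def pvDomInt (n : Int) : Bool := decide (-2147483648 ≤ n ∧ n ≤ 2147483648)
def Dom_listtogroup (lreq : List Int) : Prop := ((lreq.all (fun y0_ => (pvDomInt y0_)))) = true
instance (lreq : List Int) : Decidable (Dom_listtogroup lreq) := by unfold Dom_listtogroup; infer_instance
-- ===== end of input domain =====

-- B replaces A's per-index lookup with exception-based boundary detection by a
-- right-to-left traversal carrying the successor element, reversing the result
-- at the end (objective: alternative).


-- ===== PORT A =====
-- for i in enumerate(lreq): try lreq[i[0]+1] (IndexError → except branch); res.append(test)
def listtogroup (lreq : List Int) : List String :=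
  (PySem.List.enumerate lreq).foldl (fun res i =>
    res ++ [match PySem.List.pyGet? lreq (i.1 + 1) with
            | some nxt => "[" ++ PySem.Int.toStr i.2 ++ "," ++ PySem.Int.toStr nxt ++ ")"
            | none     => "[" ++ PySem.Int.toStr i.2 ++ "," ++ ")"]) []

-- ===== PORT B =====
-- for x in reversed(lreq): append cell using carried successor nxt; nxt = x; then res.reverse()
def listtogroup_alt (lreq : List Int) : List String :=
  (lreq.reverse.foldl (fun (st : List String × Option Int) x =>
    (st.1 ++ [match st.2 with
              | none   => "[" ++ PySem.Int.toStr x ++ ",)"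
              | some n => "[" ++ PySem.Int.toStr x ++ "," ++ PySem.Int.toStr n ++ ")"],
     some x)) ([], none)).1.reverse

-- ===== PRECONDITION & SPEC =====
def Spec_listtogroup (lreq : List Int) (out : List String) : Prop := out = listtogroup_alt lreq
instance (lreq : List Int) (out : List String) : Decidable (Spec_listtogroup lreq out) := by unfold Spec_listtogroup; infer_instance

-- ===== CLAIM (what is proved, stated in full; the proofs are below) =====
def Claim_equal_listtogroup : Prop := ∀ (lreq : List Int), Dom_listtogroup lreq → Spec_listtogroup lreq (listtogroup lreq)

-- ===== LEMMAS AND PROOFS =====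

-- the per-element string produced by A at enumerate entry i over the full list lreq
def pvCell (lreq : List Int) (i : Int × Int) : String :=
  match PySem.List.pyGet? lreq (i.1 + 1) with
  | some nxt => "[" ++ PySem.Int.toStr i.2 ++ "," ++ PySem.Int.toStr nxt ++ ")"
  | none     => "[" ++ PySem.Int.toStr i.2 ++ "," ++ ")"

-- common recursive characterisation
def pvGo : List Int → List String
  | [] => []
  | [x] => ["[" ++ PySem.Int.toStr x ++ "," ++ ")"]
  | x :: y :: r =>
      ("[" ++ PySem.Int.toStr x ++ "," ++ PySem.Int.toStr y ++ ")") :: pvGo (y :: r)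

theorem pv_str (s : String) : s ++ ",)" = s ++ "," ++ ")" := by
  rw [String.append_assoc]
  congr 1

theorem pv_foldl_map (lreq : List Int) (l : List (Int × Int)) (acc : List String) :
    l.foldl (fun res i => res ++ [pvCell lreq i]) acc = acc ++ l.map (pvCell lreq) := by
  induction l generalizing acc with
  | nil => simp
  | cons h t ih => simp [List.foldl_cons, ih]

theorem pv_get_drop (L : List Int) (k : Nat) :
    PySem.List.pyGet? L ((k : Int) + 1) = (L.drop (k + 1)).head? := by
  have : ((k : Int) + 1) = ((k + 1 : Nat) : Int) := by push_cast; ring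
  rw [this, PySem.List.pyGet?_natCast]
  simp [List.head?_drop]

theorem pv_A_go (t : List Int) : ∀ (k : Nat) (L : List Int), L.drop k = t →
    (PySem.List.enumerate t (k : Int)).map (pvCell L) = pvGo t := by
  induction t with
  | nil => intro k L h; simp [PySem.List.enumerate_nil, pvGo]
  | cons x r ih =>
    intro k L h
    have hdrop : L.drop (k + 1) = r := by
      rw [← List.tail_drop, h]; rfl
    have hcell : pvCell L (k, x) = (match r.head? with
        | some y => "[" ++ PySem.Int.toStr x ++ "," ++ PySem.Int.toStr y ++ ")"
        | none => "[" ++ PySem.Int.toStr x ++ "," ++ ")") := by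
      simp [pvCell, pv_get_drop, hdrop]
    have hk : ((k : Int) + 1) = ((k + 1 : Nat) : Int) := by push_cast; ring
    rw [PySem.List.enumerate_cons, List.map_cons, hk, ih (k + 1) L hdrop]
    cases r with
    | nil => simp [pvGo, hcell]
    | cons y r' => simp [pvGo, hcell]

theorem pv_A_eq_go (lreq : List Int) : listtogroup lreq = pvGo lreq := by
  unfold listtogroup
  have : (fun (res : List String) (i : Int × Int) => res ++
      [match PySem.List.pyGet? lreq (i.1 + 1) with
       | some nxt => "[" ++ PySem.Int.toStr i.2 ++ "," ++ PySem.Int.toStr nxt ++ ")"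
       | none     => "[" ++ PySem.Int.toStr i.2 ++ "," ++ ")"]) =
      (fun res i => res ++ [pvCell lreq i]) := by
    funext res i; rfl
  rw [this, pv_foldl_map, List.nil_append]
  have := pv_A_go lreq 0 lreq (by simp)
  simpa using this

-- B's loop body
def pvStep (st : List String × Option Int) (x : Int) : List String × Option Int :=
  (st.1 ++ [match st.2 with
            | none   => "[" ++ PySem.Int.toStr x ++ ",)"
            | some n => "[" ++ PySem.Int.toStr x ++ "," ++ PySem.Int.toStr n ++ ")"],
   some x)

-- invariant of B's right-to-left loop: after consuming r.reverse, the carried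
-- successor is r.head? and the (reversed) output is pvGo r
theorem pv_B_inv (r : List Int) :
    (r.reverse.foldl pvStep ([], none)).2 = r.head? ∧
    (r.reverse.foldl pvStep ([], none)).1.reverse = pvGo r := by
  induction r with
  | nil => exact ⟨rfl, rfl⟩
  | cons x t ih =>
    have hfold : (x :: t).reverse.foldl pvStep ([], none) =
        pvStep (t.reverse.foldl pvStep ([], none)) x := by
      rw [List.reverse_cons, List.foldl_append]; rfl
    refine ⟨by rw [hfold]; rfl, ?_⟩
    rw [hfold]
    obtain ⟨h2, h1⟩ := ih
    cases t with
    | nil =>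
      simp only [List.head?_nil] at h2
      simp [pvStep, pvGo, pv_str]
    | cons y t' =>
      simp only [List.head?_cons] at h2
      simp [pvStep, ← h1, pvGo]

theorem pv_B_eq_go (lreq : List Int) : listtogroup_alt lreq = pvGo lreq := by
  have := (pv_B_inv lreq).2
  unfold listtogroup_alt
  exact this

-- ===== VERDICT (by name: the statement is the Claim_ definition above) =====
theorem listtogroup_spec : Claim_equal_listtogroup := by
  intro lreq _
  show listtogroup lreq = listtogroup_alt lreq
  rw [pv_A_eq_go, pv_B_eq_go]
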